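-- pv_equiv track=rewrite | github.com/Ioana-P/Named_Entity_Recog_project | torch_utils.py | generate_tag_dict
-- ===== SOURCE A (Python) =====
-- def generate_tag_dict(targets_list):
--     """Function takes in a list of NE tags (which should include at least one instance of
--     every possible NE tag) and returns a dict matching each NE tag to a unique int.
--     Returns:
--     tag_map - (dict) of NE tag - associated int pairs"""
--     ne_dict = {}
--     i = 0
--     for sublist in targets_list:
--         for ne in sublist:
--             if ne in ne_dict.keys():
--                 continue
--             else:
--                 ne_dict[ne] = i
--                 i += 1
--     return ne_dict
-- ===== SOURCE B (Python) =====
-- def generate_tag_dict(targets_list):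
--     """Per-occurrence formulation: flatten once, then a single dict comprehension keeps
--     each tag at its first occurrence and computes its id independently as the number of
--     distinct tags in the flat prefix before that occurrence (no running counter)."""
--     flat = [ne for sublist in targets_list for ne in sublist]
--     return {ne: len(set(flat[:i])) for i, ne in enumerate(flat) if ne not in flat[:i]}
-- ===== Notes on version B (the rewrite author's own statement) =====
-- stated objective: alternative
-- what changed: Replaces the stateful loop with a running counter and growing dict by a stateless per-occurrence rule: flatten once, keep each tag at its first occurrence, and compute its id independently as the number of distinct tags in the flat prefix before that occurrence; trades A's O(n) single pass for O(n^2) prefix scans.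
import Mathlib
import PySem

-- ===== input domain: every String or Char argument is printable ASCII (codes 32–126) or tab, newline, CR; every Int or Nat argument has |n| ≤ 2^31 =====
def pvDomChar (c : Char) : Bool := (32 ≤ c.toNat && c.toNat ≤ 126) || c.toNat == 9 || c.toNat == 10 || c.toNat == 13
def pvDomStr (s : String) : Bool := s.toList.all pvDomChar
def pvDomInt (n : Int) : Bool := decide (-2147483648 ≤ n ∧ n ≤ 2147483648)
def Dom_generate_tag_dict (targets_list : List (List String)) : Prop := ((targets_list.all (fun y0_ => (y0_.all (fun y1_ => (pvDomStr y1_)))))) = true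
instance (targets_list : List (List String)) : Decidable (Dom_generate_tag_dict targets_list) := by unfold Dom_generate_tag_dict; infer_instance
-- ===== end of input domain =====

-- B computes each tag's id independently as the number of distinct tags before its first
-- occurrence in the flattened list (a stateless per-occurrence rule instead of A's running
-- counter); equivalent return value, no speed claim (B does quadratic prefix scans).

-- ===== PORT A =====
-- one loop: membership check against the dict built so far, counter i incremented on insert
def generate_tag_dict (targets_list : List (List String)) : List (String × Int) :=
  let st : PySem.Dict String Int × Int :=
    targets_list.foldl (fun st sublist =>
      sublist.foldl (fun st ne =>
        if st.1.contains ne then st else (st.1.insert ne st.2, st.2 + 1)) st)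
      (PySem.Dict.empty, 0)
  st.1.items

-- ===== PORT B =====
-- flat = [ne for sublist in targets_list for ne in sublist];
-- {ne: len(set(flat[:i])) for i, ne in enumerate(flat) if ne not in flat[:i]}
-- (the dict comprehension is the fold building a PySem.Dict in iteration order;
--  flat[:i] with i = enumerate index ≥ 0 is flat.take i, exact here)
def generate_tag_dict_alt (targets_list : List (List String)) : List (String × Int) :=
  let flat := targets_list.flatMap (fun sublist => sublist)
  ((PySem.List.enumerate flat).foldl (fun d p =>
      if p.2 ∈ flat.take p.1.toNat then d
      else d.insert p.2 ((PySem.Set.ofList (flat.take p.1.toNat)).length : Int))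
    PySem.Dict.empty).items

-- ===== PRECONDITION & SPEC =====
def Spec_generate_tag_dict (targets_list : List (List String)) (out : List (String × Int)) : Prop := out = generate_tag_dict_alt targets_list
instance (targets_list : List (List String)) (out : List (String × Int)) : Decidable (Spec_generate_tag_dict targets_list out) := by unfold Spec_generate_tag_dict; infer_instance

-- ===== CLAIM (what is proved, stated in full; the proofs are below) =====
def Claim_equal_generate_tag_dict : Prop := ∀ (targets_list : List (List String)), Dom_generate_tag_dict targets_list → Spec_generate_tag_dict targets_list (generate_tag_dict targets_list)

-- ===== LEMMAS AND PROOFS =====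

theorem pv_keys_state (u : List String) :
    (PySem.Dict.mk ((PySem.List.enumerate u).map (fun p => (p.2, p.1))) : PySem.Dict String Int).keys = u := by
  rw [PySem.Dict.keys_mk, List.map_map]
  exact PySem.List.map_snd_enumerate u 0

-- A's loop state after the flattened prefix l: the canonical dict over Set.ofList l, counter = its size
theorem pv_foldl_state (l : List String) :
    l.foldl (fun st ne => if st.1.contains ne then st else (st.1.insert ne st.2, st.2 + 1))
      ((PySem.Dict.empty : PySem.Dict String Int), (0 : Int))
    = (PySem.Dict.mk ((PySem.List.enumerate (PySem.Set.ofList l)).map (fun p => (p.2, p.1))),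
       ((PySem.Set.ofList l).length : Int)) := by
  induction l using List.reverseRecOn with
  | nil => rfl
  | append_singleton l' x ih =>
    rw [List.foldl_append, ih]
    have hof : PySem.Set.ofList (l' ++ [x]) = PySem.Set.add (PySem.Set.ofList l') x := by
      rw [PySem.Set.ofList_eq_foldl, PySem.Set.ofList_eq_foldl, List.foldl_append]
      rfl
    have hcont : (PySem.Dict.mk ((PySem.List.enumerate (PySem.Set.ofList l')).map
        (fun p => (p.2, p.1))) : PySem.Dict String Int).contains x
        = decide (x ∈ PySem.Set.ofList l') := by
      rw [PySem.Dict.contains_eq_decide_mem_keys, pv_keys_state]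
    by_cases hx : x ∈ PySem.Set.ofList l'
    · simp only [List.foldl_cons, List.foldl_nil, hcont, hx, decide_true, if_true, hof,
        PySem.Set.add]
      simp [PySem.Set.contains, hx]
    · simp only [List.foldl_cons, List.foldl_nil, hcont, hx, decide_false, hof,
        PySem.Set.add]
      have hc : PySem.Set.contains (PySem.Set.ofList l') x = false := by
        simp [PySem.Set.contains, hx]
      rw [hc]
      simp only [Bool.false_eq_true, if_false]
      refine Prod.ext ?_ ?_
      · apply PySem.Dict.ext
        rw [PySem.Dict.items_insert_of_not_contains _ _ (by rw [hcont]; simp [hx])]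
        rw [PySem.List.enumerate_append]
        simp [PySem.List.enumerate]
      · simp

-- B's fold over the remaining enumerated suffix, with the canonical dict for the prefix
theorem pv_altfold_state (flat : List String) : ∀ (l pre : List String), pre ++ l = flat →
    (PySem.List.enumerate l (pre.length : Int)).foldl (fun d p =>
        if p.2 ∈ flat.take p.1.toNat then d
        else d.insert p.2 ((PySem.Set.ofList (flat.take p.1.toNat)).length : Int))
      (PySem.Dict.mk ((PySem.List.enumerate (PySem.Set.ofList pre)).map (fun p => (p.2, p.1))))
    = PySem.Dict.mk ((PySem.List.enumerate (PySem.Set.ofList flat)).map (fun p => (p.2, p.1))) := by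
  intro l
  induction l with
  | nil =>
    intro pre h
    simp [PySem.List.enumerate, ← h]
  | cons x xs ih =>
    intro pre h
    rw [PySem.List.enumerate_cons]
    have htake : flat.take pre.length = pre := by
      rw [← h]; simp
    have hof : PySem.Set.ofList (pre ++ [x]) = PySem.Set.add (PySem.Set.ofList pre) x := by
      rw [PySem.Set.ofList_eq_foldl, PySem.Set.ofList_eq_foldl, List.foldl_append]
      rfl
    have happ : (pre ++ [x]) ++ xs = flat := by simpa using h
    have hlen : ((pre ++ [x]).length : Int) = (pre.length : Int) + 1 := by
      simp
    by_cases hx : x ∈ pre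
    · have hxs : x ∈ PySem.Set.ofList pre := by
        rw [← PySem.List.dedup_eq_ofList, PySem.List.mem_dedup]; exact hx
      have hsame : PySem.Set.ofList (pre ++ [x]) = PySem.Set.ofList pre := by
        rw [hof, PySem.Set.add]
        simp [PySem.Set.contains, hxs]
      have := ih (pre ++ [x]) happ
      rw [hsame, hlen] at this
      simp only [List.foldl_cons, Int.toNat_natCast, htake, hx, if_true]
      exact this
    · have hxs : x ∉ PySem.Set.ofList pre := by
        rw [← PySem.List.dedup_eq_ofList, PySem.List.mem_dedup]; exact hx
      have hcont : (PySem.Dict.mk ((PySem.List.enumerate (PySem.Set.ofList pre)).map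
          (fun p => (p.2, p.1))) : PySem.Dict String Int).contains x = false := by
        rw [PySem.Dict.contains_eq_decide_mem_keys, pv_keys_state]
        simp [hxs]
      have hins : (PySem.Dict.mk ((PySem.List.enumerate (PySem.Set.ofList pre)).map
            (fun p => (p.2, p.1))) : PySem.Dict String Int).insert x
              ((PySem.Set.ofList pre).length : Int)
          = PySem.Dict.mk ((PySem.List.enumerate (PySem.Set.ofList (pre ++ [x]))).map
            (fun p => (p.2, p.1))) := by
        apply PySem.Dict.ext
        rw [PySem.Dict.items_insert_of_not_contains _ _ (by rw [hcont])]
        rw [hof, PySem.Set.add]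
        simp only [PySem.Set.contains, List.contains_eq_mem, hxs, decide_false]
        rw [if_neg (by simp)]
        rw [PySem.List.enumerate_append]
        simp [PySem.List.enumerate]
      have := ih (pre ++ [x]) happ
      rw [hlen] at this
      simp only [List.foldl_cons, Int.toNat_natCast, htake, hx, if_false]
      rw [hins]
      exact this

-- ===== VERDICT (by name: the statement is the Claim_ definition above) =====
theorem generate_tag_dict_spec : Claim_equal_generate_tag_dict := by
  intro targets_list _
  unfold Spec_generate_tag_dict
  simp only [generate_tag_dict, generate_tag_dict_alt]
  rw [← List.foldl_flatMap, pv_foldl_state]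
  have := pv_altfold_state (targets_list.flatMap (fun sublist => sublist))
    (targets_list.flatMap (fun sublist => sublist)) [] (by simp)
  simp only [List.length_nil, Int.natCast_zero] at this
  rw [show (PySem.Set.ofList ([] : List String)) = [] from rfl] at this
  rw [show (PySem.List.enumerate ([] : List String) 0) = [] from rfl] at this
  simp only [List.map_nil] at this
  rw [show (PySem.Dict.mk ([] : List (String × Int))) = PySem.Dict.empty from rfl] at this
  rw [this]
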